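-- pv_equiv track=rewrite | github.com/michelebenvenuto/DLP-proyect-3 | utils.py | add_or_opperator
-- ===== SOURCE A (Python) =====
-- def add_or_opperator(string):
--     i = 0
--     new_string =''
--     found_quote = False
--     set_positions = find_sets(string)
--     while i < len(string):
--         new_string += string[i]
--         if i  in  set_positions:
--             found_quote = not found_quote
--         elif found_quote:
--             if i + 1 < len(string) and string[i + 1 ] != '"':
--                 new_string += "¦"
--         i += 1
--     return new_string
--
-- def find_sets(string):
--     positions = []
--     i = 0
--     while i < len(string):
--         if string[i] == '"':
--             positions.append(i)
--         i += 1
--     return positions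
-- ===== SOURCE B (Python) =====
-- def add_or_opperator(string):
--     parts = string.split('"')
--     for k in range(1, len(parts), 2):
--         parts[k] = "\u00a6".join(parts[k])
--     return '"'.join(parts)
-- ===== Notes on version B (the rewrite author's own statement) =====
-- stated objective: faster
-- what changed: Replaces A's stateful index scan, which precomputes a list of quote positions and does a linear membership test in it for every character, by a split-at-the-quote-delimiter decomposition: the odd-numbered segments (the in-quote regions) get the marker character interspersed via join, and the segments are rejoined with the delimiter.
import Mathlib
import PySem

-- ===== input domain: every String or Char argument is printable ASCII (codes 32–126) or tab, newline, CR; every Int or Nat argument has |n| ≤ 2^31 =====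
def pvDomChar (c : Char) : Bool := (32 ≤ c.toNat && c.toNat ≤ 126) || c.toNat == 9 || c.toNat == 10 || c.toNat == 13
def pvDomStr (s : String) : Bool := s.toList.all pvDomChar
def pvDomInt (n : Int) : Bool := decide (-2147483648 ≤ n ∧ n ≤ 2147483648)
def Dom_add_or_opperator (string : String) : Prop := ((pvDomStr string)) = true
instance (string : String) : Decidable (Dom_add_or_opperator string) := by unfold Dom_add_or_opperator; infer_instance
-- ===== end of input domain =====

-- B replaces A's stateful index scan (with its precomputed quote-position table) by a
-- split-on-quote / join decomposition: odd split segments get the marker interspersed. Objective: faster (measured).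

-- ===== PORT A =====
-- find_sets: while loop collecting the indices of '"'
def findSetsLoop (s : List Char) (i : Nat) (positions : List Int) : List Int :=
  if h : i < s.length then
    findSetsLoop s (i + 1) (if s[i] = '"' then positions ++ [(i : Int)] else positions)
  else positions
termination_by s.length - i

def find_sets (string : String) : List Int := findSetsLoop string.toList 0 []

-- the main while loop of A
def addLoop (s : List Char) (pos : List Int) (i : Nat) (acc : List Char) (found : Bool) : List Char :=
  if h : i < s.length then
    let acc' := acc ++ [s[i]]
    if (i : Int) ∈ pos then addLoop s pos (i + 1) acc' (!found)
    else if found then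
      if h2 : i + 1 < s.length then
        if s[i + 1] ≠ '"' then addLoop s pos (i + 1) (acc' ++ ['¦']) found
        else addLoop s pos (i + 1) acc' found
      else addLoop s pos (i + 1) acc' found
    else addLoop s pos (i + 1) acc' found
  else acc
termination_by s.length - i

def add_or_opperator (string : String) : String :=
  String.ofList (addLoop string.toList (find_sets string) 0 [] false)

-- ===== PORT B =====
-- Source B: parts = string.split('"'); odd-index parts become "¦".join(part); return '"'.join(parts)
def add_or_opperator_alt (string : String) : String :=
  let parts := PySem.Chars.splitOn string.toList ['"']
  let parts' := (PySem.List.enumerate parts 0).map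
    (fun p => if PySem.Int.mod p.1 2 = 1 then PySem.Chars.join ['¦'] (p.2.map (fun c => [c])) else p.2)
  String.ofList (PySem.Chars.join ['"'] parts')

-- ===== PRECONDITION & SPEC =====
def Spec_add_or_opperator (string : String) (out : String) : Prop := out = add_or_opperator_alt string
instance (string : String) (out : String) : Decidable (Spec_add_or_opperator string out) := by unfold Spec_add_or_opperator; infer_instance

-- ===== CLAIM (what is proved, stated in full; the proofs are below) =====
def Claim_equal_add_or_opperator : Prop := ∀ (string : String), Dom_add_or_opperator string → Spec_add_or_opperator string (add_or_opperator string)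

-- ===== LEMMAS AND PROOFS =====

-- common reference function: one char-level scan carrying the quote-parity flag
def markNext (cs : List Char) : Bool :=
  match cs with
  | [] => false
  | d :: _ => d ≠ '"'

def gRef : List Char → Bool → List Char
  | [], _ => []
  | c :: cs, f =>
    c :: (if c = '"' then gRef cs (!f)
          else if f && markNext cs then '¦' :: gRef cs f else gRef cs f)

-- ---- A side: the index loop is the char-level scan ----
lemma mem_findSetsLoop (s : List Char) (j : Nat) :
    ∀ n i acc, s.length - i = n →
      (((j : Int) ∈ findSetsLoop s i acc) ↔
        ((j : Int) ∈ acc ∨ (i ≤ j ∧ j < s.length ∧ s[j]! = '"'))) := by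
  intro n
  induction n with
  | zero =>
    intro i acc h
    rw [findSetsLoop]
    have hi : ¬ i < s.length := by omega
    rw [dif_neg hi]
    constructor
    · exact Or.inl
    · rintro (hj | ⟨h1, h2, _⟩)
      · exact hj
      · omega
  | succ m ih =>
    intro i acc h
    rw [findSetsLoop]
    have hi : i < s.length := by omega
    rw [dif_pos hi, ih (i + 1) _ (by omega)]
    have hgi : s[i]! = s[i] := getElem!_pos s i hi
    by_cases hq : s[i] = '"'
    · rw [if_pos hq]
      by_cases hji : j = i
      · subst hji
        simp [hq, hi]
      · have hmem : ((j : Int) ∈ acc ++ [(i : Int)]) ↔ (j : Int) ∈ acc := by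
          simp only [List.mem_append, List.mem_singleton, Nat.cast_inj, hji, or_false]
        rw [hmem]
        have harith : (i + 1 ≤ j) ↔ (i ≤ j) := by omega
        rw [harith]
    · rw [if_neg hq]
      constructor
      · rintro (hj | ⟨h1, h2, h3⟩)
        · exact Or.inl hj
        · exact Or.inr ⟨by omega, h2, h3⟩
      · rintro (hj | ⟨h1, h2, h3⟩)
        · exact Or.inl hj
        · by_cases hji : j = i
          · subst hji; rw [hgi] at h3; exact absurd h3 hq
          · exact Or.inr ⟨by omega, h2, h3⟩

lemma mem_find_sets (string : String) (j : Nat) (hlt : j < string.toList.length) :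
    ((j : Int) ∈ find_sets string) ↔ string.toList[j] = '"' := by
  rw [find_sets, mem_findSetsLoop string.toList j (string.toList.length - 0) 0 [] rfl,
    getElem!_pos string.toList j hlt]
  constructor
  · rintro (h | ⟨_, _, h⟩)
    · simp at h
    · exact h
  · intro h
    exact Or.inr ⟨Nat.zero_le j, hlt, h⟩

lemma addLoop_eq (string : String) :
    ∀ n i acc f, string.toList.length - i = n →
      addLoop string.toList (find_sets string) i acc f = acc ++ gRef (string.toList.drop i) f := by
  intro n
  induction n with
  | zero =>
    intro i acc f h
    rw [addLoop]
    have hi : ¬ i < string.toList.length := by omega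
    rw [dif_neg hi, List.drop_eq_nil_of_le (by omega)]
    simp [gRef]
  | succ m ih =>
    intro i acc f h
    rw [addLoop]
    have hi : i < string.toList.length := by omega
    simp only [hi, dif_pos]
    have hdrop : string.toList.drop i = string.toList[i] :: string.toList.drop (i + 1) :=
      List.drop_eq_getElem_cons hi
    by_cases hq : string.toList[i] = '"'
    · have hmem : (i : Int) ∈ find_sets string := (mem_find_sets string i hi).mpr hq
      simp only [hmem, if_pos]
      rw [ih (i + 1) _ _ (by omega), hdrop]
      simp [gRef, hq]
    · have hmem : ¬ (i : Int) ∈ find_sets string := fun hm => hq ((mem_find_sets string i hi).mp hm)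
      simp only [hmem, if_neg, not_false_iff]
      rw [hdrop]
      cases f with
      | false =>
        simp only [Bool.false_eq_true, if_false]
        rw [ih (i + 1) _ _ (by omega)]
        simp [gRef, hq]
      | true =>
        simp only [if_pos]
        by_cases h2 : i + 1 < string.toList.length
        · simp only [h2, dif_pos]
          have hdrop2 : string.toList.drop (i + 1)
              = string.toList[i + 1] :: string.toList.drop (i + 2) :=
            List.drop_eq_getElem_cons h2
          by_cases hq2 : string.toList[i + 1] = '"'
          · have hne : ¬ string.toList[i + 1] ≠ '"' := by simpa using hq2
            simp only [hne, if_neg, not_false_iff]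
            rw [ih (i + 1) _ _ (by omega)]
            have hmn : markNext (string.toList.drop (i + 1)) = false := by
              rw [hdrop2]; simp [markNext, hq2]
            simp [gRef, hq, hmn]
          · simp only [ne_eq, hq2, not_false_iff, if_pos]
            rw [ih (i + 1) _ _ (by omega)]
            have hmn : markNext (string.toList.drop (i + 1)) = true := by
              rw [hdrop2]; simp [markNext, hq2]
            simp [gRef, hq, hmn]
        · simp only [h2, dif_neg, not_false_iff]
          rw [ih (i + 1) _ _ (by omega)]
          have hmn : markNext (string.toList.drop (i + 1)) = false := by
            rw [List.drop_eq_nil_of_le (by omega)]; rfl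
          simp [gRef, hq, hmn]

lemma portA_eq (string : String) :
    add_or_opperator string = String.ofList (gRef string.toList false) := by
  rw [add_or_opperator, addLoop_eq string (string.toList.length - 0) 0 [] false rfl]
  simp

-- ---- B side: split-then-join is the char-level scan ----
def mySplit (q : Char) : List Char → List (List Char)
  | [] => [[]]
  | c :: cs => if c = q then [] :: mySplit q cs else (mySplit q cs).modifyHead (c :: ·)

lemma mySplit_ne_nil (q : Char) (l : List Char) : mySplit q l ≠ [] := by
  cases l with
  | nil => simp [mySplit]
  | cons c cs =>
    simp only [mySplit]
    split
    · simp
    · exact fun hh => (mySplit_ne_nil q cs) (List.modifyHead_eq_nil_iff.mp hh)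

lemma splitOn_go_eq (q : Char) :
    ∀ fuel l cur acc, l.length < fuel →
      PySem.Chars.splitOn.go [q] fuel l cur acc
        = acc.reverse ++ (mySplit q l).modifyHead (cur.reverse ++ ·) := by
  intro fuel
  induction fuel with
  | zero => intro l cur acc h; omega
  | succ f ih =>
    intro l cur acc h
    cases l with
    | nil => simp [PySem.Chars.splitOn.go, mySplit]
    | cons c rest =>
      rw [PySem.Chars.splitOn.go]
      by_cases hc : c = q
      · subst hc
        simp only [List.isPrefixOf, beq_self_eq_true, Bool.true_and, if_pos,
          List.length_cons, List.length_nil, List.drop_succ_cons, List.drop_zero]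
        rw [ih rest [] (cur.reverse :: acc) (by simpa using Nat.lt_of_succ_lt_succ h)]
        have hid : List.modifyHead (fun x : List Char => x) (mySplit c rest) = mySplit c rest :=
          congrFun List.modifyHead_id _
        simp [mySplit, hid]
      · have hp : [q].isPrefixOf (c :: rest) = false := by
          simp only [List.isPrefixOf, Bool.and_eq_false_iff, beq_eq_false_iff_ne, ne_eq]
          exact Or.inl fun hq => absurd hq.symm hc
        simp only [hp, Bool.false_eq_true, if_false]
        rw [ih rest (c :: cur) acc (by simpa using Nat.lt_of_succ_lt_succ h)]
        simp only [mySplit, hc, if_false]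
        obtain ⟨p0, ps, hps⟩ : ∃ p0 ps, mySplit q rest = p0 :: ps := by
          cases hsp : mySplit q rest with
          | nil => exact absurd hsp (mySplit_ne_nil q rest)
          | cons a b => exact ⟨a, b, rfl⟩
        simp [hps]

lemma splitOn_eq_mySplit (q : Char) (l : List Char) :
    PySem.Chars.splitOn l [q] = mySplit q l := by
  rw [PySem.Chars.splitOn, splitOn_go_eq q (l.length + 1) l [] [] (by omega)]
  obtain ⟨p0, ps, hps⟩ : ∃ p0 ps, mySplit q l = p0 :: ps := by
    cases hsp : mySplit q l with
    | nil => exact absurd hsp (mySplit_ne_nil q l)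
    | cons a b => exact ⟨a, b, rfl⟩
  simp [hps]

def mark (p : List Char) : List Char := PySem.Chars.join ['¦'] (p.map (fun c => [c]))

def proc : List (List Char) → Bool → List Char
  | [], _ => []
  | [p], b => if b then mark p else p
  | p :: ps, b => (if b then mark p else p) ++ '"' :: proc ps (!b)

lemma mark_nil : mark [] = [] := by simp [mark, PySem.Chars.join, List.intercalate]

lemma mark_cons (c : Char) (p : List Char) :
    mark (c :: p) = if p = [] then [c] else c :: '¦' :: mark p := by
  cases p with
  | nil => simp [mark, PySem.Chars.join, List.intercalate]
  | cons d t => simp [mark, PySem.Chars.join_cons_cons]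

lemma proc_modifyHead (c : Char) (p0 : List Char) (ps : List (List Char)) (f : Bool) :
    proc ((c :: p0) :: ps) f
      = c :: (if f && !(p0.isEmpty) then '¦' :: proc (p0 :: ps) f else proc (p0 :: ps) f) := by
  cases ps with
  | nil =>
    cases f <;> cases p0 <;> simp [proc, mark_cons, mark_nil]
  | cons p1 ps' =>
    cases f <;> cases p0 <;> simp [proc, mark_cons, mark_nil]

lemma proc_mySplit (l : List Char) (f : Bool) :
    proc (mySplit '"' l) f = gRef l f := by
  induction l generalizing f with
  | nil => cases f <;> simp [mySplit, proc, gRef, mark]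
  | cons c cs ih =>
    by_cases hc : c = '"'
    · subst hc
      obtain ⟨p0, ps, hps⟩ : ∃ p0 ps, mySplit '"' cs = p0 :: ps := by
        cases hsp : mySplit '"' cs with
        | nil => exact absurd hsp (mySplit_ne_nil _ cs)
        | cons a b => exact ⟨a, b, rfl⟩
      simp only [mySplit, gRef, hps]
      have hih := ih (!f)
      rw [hps] at hih
      cases f <;> simp_all [proc, mark_nil]
    · obtain ⟨p0, ps, hps⟩ : ∃ p0 ps, mySplit '"' cs = p0 :: ps := by
        cases hsp : mySplit '"' cs with
        | nil => exact absurd hsp (mySplit_ne_nil _ cs)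
        | cons a b => exact ⟨a, b, rfl⟩
      have hnext : (f && !(p0.isEmpty)) = (f && markNext cs) := by
        congr 1
        cases cs with
        | nil => simp [mySplit] at hps; simp [hps.1, markNext]
        | cons d t =>
          by_cases hd : d = '"'
          · subst hd; simp [mySplit] at hps; simp [hps.1, markNext]
          · simp only [mySplit, if_neg hd] at hps
            obtain ⟨q0, qs, hqs⟩ : ∃ q0 qs, mySplit '"' t = q0 :: qs := by
              cases hsp : mySplit '"' t with
              | nil => exact absurd hsp (mySplit_ne_nil _ t)
              | cons a b => exact ⟨a, b, rfl⟩
            rw [hqs] at hps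
            simp only [List.modifyHead_cons, List.cons.injEq] at hps
            simp [← hps.1, markNext, hd]
      simp only [mySplit, if_neg hc, hps, List.modifyHead_cons]
      rw [proc_modifyHead, hnext, ← hps, ih]
      simp [gRef, hc]

lemma parity_flip (k : Int) :
    (decide (PySem.Int.mod (k + 1) 2 = 1)) = !(decide (PySem.Int.mod k 2 = 1)) := by
  rw [PySem.Int.mod_eq_emod_of_pos (by norm_num : (0:Int) < 2),
    PySem.Int.mod_eq_emod_of_pos (by norm_num : (0:Int) < 2)]
  have h1 := Int.emod_emod_of_dvd k (dvd_refl 2)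
  have h2 : k % 2 = 0 ∨ k % 2 = 1 := by omega
  rcases h2 with h | h <;> simp [Int.add_emod, h]

lemma join_enumerate (ps : List (List Char)) :
    ∀ k : Int, 0 ≤ k → ps ≠ [] →
      PySem.Chars.join ['"'] ((PySem.List.enumerate ps k).map
        (fun p => if PySem.Int.mod p.1 2 = 1 then mark p.2 else p.2))
        = proc ps (decide (PySem.Int.mod k 2 = 1)) := by
  induction ps with
  | nil => intro k _ hne; exact absurd rfl hne
  | cons p ps ih =>
    intro k hk _
    rw [PySem.List.enumerate_cons]
    cases ps with
    | nil =>
      simp only [PySem.List.enumerate_nil, List.map_cons, List.map_nil, proc,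
        PySem.Chars.join_singleton]
      by_cases hm : PySem.Int.mod k 2 = 1 <;> simp [hm]
    | cons p1 ps' =>
      rw [List.map_cons]
      obtain ⟨x, xs, hx⟩ : ∃ x xs, (PySem.List.enumerate (p1 :: ps') (k + 1)).map
          (fun p => if PySem.Int.mod p.1 2 = 1 then mark p.2 else p.2) = x :: xs := by
        rw [PySem.List.enumerate_cons, List.map_cons]; exact ⟨_, _, rfl⟩
      rw [hx, PySem.Chars.join_cons_cons, ← hx, ih (k + 1) (by omega) (by simp),
        parity_flip k]
      simp only [proc]
      by_cases hm : PySem.Int.mod k 2 = 1 <;> simp [hm]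

lemma portB_eq (string : String) :
    add_or_opperator_alt string = String.ofList (gRef string.toList false) := by
  simp only [add_or_opperator_alt]
  rw [splitOn_eq_mySplit]
  have hje := join_enumerate (mySplit '"' string.toList) 0 (by norm_num)
    (mySplit_ne_nil _ _)
  have h0 : (decide (PySem.Int.mod 0 2 = 1)) = false := by decide
  rw [h0] at hje
  have hm : (fun p : Int × List Char =>
      if PySem.Int.mod p.1 2 = 1 then PySem.Chars.join ['¦'] (p.2.map (fun c => [c])) else p.2)
      = (fun p : Int × List Char => if PySem.Int.mod p.1 2 = 1 then mark p.2 else p.2) := rfl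
  rw [hm, hje, proc_mySplit]

-- ===== VERDICT (by name: the statement is the Claim_ definition above) =====
theorem add_or_opperator_spec : Claim_equal_add_or_opperator := by
  intro s _
  unfold Spec_add_or_opperator
  rw [portA_eq, portB_eq]
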